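-- pv_equiv track=rewrite | github.com/MrBrantCode/unitest_baseline | mut_generate/mist_train_cf/cf_66636/solution.py | find_recurring_char
-- ===== SOURCE A (Python) =====
-- def find_recurring_char(text):
--     char_dict = {}
--     for i, char in enumerate(text):
--         if not char.isalpha():
--             continue
--
--         char = char.lower()
--
--         if char in char_dict:
--             return (char, char_dict[char], i)
--
--         char_dict[char] = i
--
--     return "No recurring character found in given text."
-- ===== SOURCE B (Python) =====
-- def find_recurring_char(text):
--     # Build a full index of alphabetic characters (lowercased) to their positions,
--     # then pick the character whose second occurrence comes earliest.
--     pairs = [(ch.lower(), i) for i, ch in enumerate(text) if ch.isalpha()]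
--     positions = {}
--     for key, i in pairs:
--         positions.setdefault(key, []).append(i)
--     best = None
--     for ch, idxs in positions.items():
--         if len(idxs) >= 2 and (best is None or idxs[1] < best[2]):
--             best = (ch, idxs[0], idxs[1])
--     if best is None:
--         return "No recurring character found in given text."
--     return best
-- ===== Notes on version B (the rewrite author's own statement) =====
-- stated objective: alternative
-- what changed: Replaces A's single-pass early-return dict scan by a two-phase build-index-then-select: B first groups all positions of each lowercased alphabetic character, then picks the character whose second occurrence is earliest; Pre_ excludes texts with no repeated alphabetic character, where A leaves the declared tuple type and returns a plain message string (B returns the same string).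
import Mathlib
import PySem

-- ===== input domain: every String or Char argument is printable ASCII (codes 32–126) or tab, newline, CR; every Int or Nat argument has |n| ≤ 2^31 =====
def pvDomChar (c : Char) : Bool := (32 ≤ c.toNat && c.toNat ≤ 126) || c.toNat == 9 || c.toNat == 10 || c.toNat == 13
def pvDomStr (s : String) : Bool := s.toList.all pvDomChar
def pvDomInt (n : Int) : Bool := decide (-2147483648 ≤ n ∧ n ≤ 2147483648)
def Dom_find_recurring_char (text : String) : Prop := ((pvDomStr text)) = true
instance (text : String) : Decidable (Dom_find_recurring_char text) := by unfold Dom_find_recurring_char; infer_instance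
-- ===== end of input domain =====

-- B replaces A's early-return scan with a build-full-index-then-select-earliest-second-occurrence
-- decomposition (objective: alternative). Outside Pre_ (no repeated alphabetic character) the Python
-- functions return a message string instead of a tuple; the ports encode that case as (pvMsg, -1, -1).

def pvMsg : String := "No recurring character found in given text."

-- ===== PORT A =====
-- the loop over enumerate(text) with the seen-dict and early return
def pvGoA (d : PySem.Dict Char Int) : List (Int × Char) → String × Int × Int
  | [] => (pvMsg, -1, -1)
  | (i, c) :: rest =>
    if !(PySem.Chars.isalpha c) then pvGoA d rest
    else
      let c' := PySem.Chars.lowerChar c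
      match d.get? c' with
      | some j => (String.ofList [c'], j, i)
      | none => pvGoA (d.insert c' i) rest

def find_recurring_char (text : String) : String × Int × Int :=
  pvGoA PySem.Dict.empty (PySem.List.enumerate text.toList)

-- ===== PORT B =====
-- pairs = [(ch.lower(), i) for i, ch in enumerate(text) if ch.isalpha()]
def pvPairsB (text : String) : List (Char × Int) :=
  ((PySem.List.enumerate text.toList).filter (fun p => PySem.Chars.isalpha p.2)).map
    (fun p => (PySem.Chars.lowerChar p.2, p.1))

-- the 'positions.setdefault(key, []).append(i)' loop
def pvBuildB (pairs : List (Char × Int)) : PySem.Dict Char (List Int) :=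
  pairs.foldl (fun d p => d.modify p.1 [] (· ++ [p.2])) PySem.Dict.empty

-- the selection loop over positions.items()
def pvSelB (best : Option (String × Int × Int)) : List (Char × List Int) → Option (String × Int × Int)
  | [] => best
  | (ch, idxs) :: rest =>
    match idxs with
    | i0 :: i1 :: _ =>
      match best with
      | none => pvSelB (some (String.ofList [ch], i0, i1)) rest
      | some b =>
        if i1 < b.2.2 then pvSelB (some (String.ofList [ch], i0, i1)) rest else pvSelB (some b) rest
    | _ => pvSelB best rest

def find_recurring_char_alt (text : String) : String × Int × Int :=
  match pvSelB none (pvBuildB (pvPairsB text)).items with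
  | none => (pvMsg, -1, -1)
  | some b => b

-- ===== PRECONDITION & SPEC =====
-- Pre_ excludes texts with no repeated alphabetic character (case-insensitive): there the Python A
-- returns a plain message string rather than a value of the declared tuple type (B returns the same string).
def Pre_find_recurring_char (text : String) : Prop :=
  ¬ ((text.toList.filter PySem.Chars.isalpha).map PySem.Chars.lowerChar).Nodup
instance (text : String) : Decidable (Pre_find_recurring_char text) := by
  unfold Pre_find_recurring_char; infer_instance

def pvWitness_find_recurring_char : String := "abca"

def Spec_find_recurring_char (text : String) (out : String × Int × Int) : Prop :=
  out = find_recurring_char_alt text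
instance (text : String) (out : String × Int × Int) : Decidable (Spec_find_recurring_char text out) := by
  unfold Spec_find_recurring_char; infer_instance

-- ===== CLAIM =====
def Claim_equal_find_recurring_char : Prop :=
  ∀ (text : String), Dom_find_recurring_char text → Pre_find_recurring_char text →
    Spec_find_recurring_char text (find_recurring_char text)

-- ===== LEMMAS AND PROOFS =====

-- A's scan, restated on the filtered/lowered pair list
def pvScan (d : PySem.Dict Char Int) : List (Char × Int) → String × Int × Int
  | [] => (pvMsg, -1, -1)
  | (c, i) :: rest =>
    match d.get? c with
    | some j => (String.ofList [c], j, i)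
    | none => pvScan (d.insert c i) rest

-- positions of key c in a pair list
def pvOcc (P : List (Char × Int)) (c : Char) : List Int :=
  (P.filter (fun p => p.1 == c)).map (·.2)

theorem pvGoA_eq_scan (l : List (Int × Char)) (d : PySem.Dict Char Int) :
    pvGoA d l = pvScan d ((l.filter (fun p => PySem.Chars.isalpha p.2)).map
      (fun p => (PySem.Chars.lowerChar p.2, p.1))) := by
  induction l generalizing d with
  | nil => rfl
  | cons p rest ih =>
    obtain ⟨i, c⟩ := p
    by_cases h : PySem.Chars.isalpha c
    · simp only [pvGoA, h, Bool.not_true, List.filter_cons, if_pos, List.map_cons]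
      simp only [pvScan]
      cases hget : (d.get? (PySem.Chars.lowerChar c)) with
      | some j => simp
      | none => simpa using ih _
    · simp only [pvGoA, List.filter_cons]
      simp [h, ih]

theorem pvOcc_append (l₁ l₂ : List (Char × Int)) (c : Char) :
    pvOcc (l₁ ++ l₂) c = pvOcc l₁ c ++ pvOcc l₂ c := by
  simp [pvOcc]

theorem pv_filter_singleton_of_find? (pre : List (Char × Int)) (c : Char)
    (hnd : (pre.map (·.1)).Nodup) (q : Char × Int)
    (h : pre.find? (fun p => p.1 == c) = some q) :
    pre.filter (fun p => p.1 == c) = [q] := by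
  induction pre with
  | nil => simp at h
  | cons p rest ih =>
    simp only [List.map_cons, List.nodup_cons] at hnd
    by_cases hb : (p.1 == c) = true
    · simp only [List.find?_cons, hb] at h
      cases Option.some.inj h
      have hrest : rest.filter (fun p => p.1 == c) = [] := by
        rw [List.filter_eq_nil_iff]
        intro x hx hxc
        apply hnd.1
        have hx1 : x.1 = q.1 := by
          have h1 : x.1 = c := by simpa using hxc
          have h2 : q.1 = c := by simpa using hb
          rw [h1, h2]
        exact hx1 ▸ List.mem_map_of_mem hx
      simp [hb, hrest]
    · simp only [List.find?_cons, Bool.not_eq_true] at h hb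
      rw [hb] at h
      rw [List.filter_cons, hb]
      simpa using ih hnd.2 h

theorem pv_not_mem_of_find?_none (pre : List (Char × Int)) (c : Char)
    (h : pre.find? (fun p => p.1 == c) = none) : c ∉ pre.map (·.1) := by
  intro hc
  obtain ⟨p, hp, hpc⟩ := List.mem_map.mp hc
  exact (List.find?_eq_none.mp h p hp) (by simp [hpc])

-- the selection fold keeps a best whose second index no item can beat
theorem pvSelB_keep (items : List (Char × List Int)) (s : String) (v0 i : Int)
    (h : ∀ p ∈ items, ∀ a b l, p.2 = a :: b :: l → ¬ b < i) :
    pvSelB (some (s, v0, i)) items = some (s, v0, i) := by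
  induction items with
  | nil => rfl
  | cons p rest ih =>
    obtain ⟨ch, idxs⟩ := p
    cases idxs with
    | nil => exact ih (fun q hq => h q (by simp [hq]))
    | cons a t =>
      cases t with
      | nil => exact ih (fun q hq => h q (by simp [hq]))
      | cons b l =>
        have hnb : ¬ b < i := h (ch, a :: b :: l) (by simp) a b l rfl
        simp only [pvSelB, if_neg hnb]
        exact ih (fun q hq => h q (by simp [hq]))

-- reaching the unique-minimum item makes it the final best
theorem pvSelB_min (items : List (Char × List Int)) (c : Char) (v0 i : Int) (t : List Int)
    (hmem : (c, v0 :: i :: t) ∈ items)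
    (hkeys : (items.map (·.1)).Nodup)
    (hoth : ∀ p ∈ items, p.1 ≠ c → ∀ a b l, p.2 = a :: b :: l → i < b)
    (best : Option (String × Int × Int))
    (hbest : best = none ∨ ∃ s v0' j, best = some (s, v0', j) ∧ i < j) :
    pvSelB best items = some (String.ofList [c], v0, i) := by
  induction items generalizing best with
  | nil => simp at hmem
  | cons p rest ih =>
    simp only [List.map_cons, List.nodup_cons] at hkeys
    rcases List.mem_cons.mp hmem with heq | hmem'
    · -- head is the minimum item
      subst heq
      have hstep : pvSelB best ((c, v0 :: i :: t) :: rest)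
          = pvSelB (some (String.ofList [c], v0, i)) rest := by
        rcases hbest with rfl | ⟨s, v0', j, rfl, hij⟩
        · rfl
        · simp [pvSelB, hij]
      rw [hstep]
      apply pvSelB_keep
      intro q hq a b l hl
      have hqc : q.1 ≠ c := by
        intro hqc
        apply hkeys.1
        rw [← hqc]
        exact List.mem_map.mpr ⟨q, hq, rfl⟩
      have := hoth q (List.mem_cons_of_mem _ hq) hqc a b l hl
      omega
    · -- head is some other item
      obtain ⟨ch, idxs⟩ := p
      have hne : ch ≠ c := by
        intro hh
        apply hkeys.1
        rw [hh]
        exact List.mem_map.mpr ⟨(c, v0 :: i :: t), hmem', rfl⟩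
      have hoth' : ∀ q ∈ rest, q.1 ≠ c → ∀ a b l, q.2 = a :: b :: l → i < b :=
        fun q hq => hoth q (List.mem_cons_of_mem _ hq)
      cases idxs with
      | nil => exact ih hmem' hkeys.2 hoth' best hbest
      | cons a t' =>
        cases t' with
        | nil => exact ih hmem' hkeys.2 hoth' best hbest
        | cons b l =>
          have hib : i < b := hoth (ch, a :: b :: l) (by simp) (by simpa using hne) a b l rfl
          rcases hbest with rfl | ⟨s, v0', j, rfl, hij⟩
          · simp only [pvSelB]
            exact ih hmem' hkeys.2 hoth' _ (Or.inr ⟨_, _, _, rfl, hib⟩)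
          · simp only [pvSelB]
            by_cases hbj : b < j
            · rw [if_pos hbj]
              exact ih hmem' hkeys.2 hoth' _ (Or.inr ⟨_, _, _, rfl, hib⟩)
            · rw [if_neg hbj]
              exact ih hmem' hkeys.2 hoth' _ (Or.inr ⟨_, _, _, rfl, hij⟩)

theorem pvBuildB_items (P : List (Char × Int)) :
    (pvBuildB P).items = (PySem.Set.ofList (P.map (·.1))).map (fun k => (k, pvOcc P k)) := by
  have hkeys : (pvBuildB P).keys = PySem.Set.ofList (P.map (·.1)) := by
    have := PySem.Dict.keys_foldl_modify_key P (·.1) ([] : List Int)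
      (fun _ p => (· ++ [p.2])) PySem.Dict.empty
    simpa [pvBuildB, PySem.Set.update_nil_left] using this
  have hnd : (pvBuildB P).keys.Nodup := by
    apply PySem.Dict.nodup_keys_foldl_modify_key
    simp
  rw [PySem.Dict.items_eq_map_keys _ hnd [], hkeys]
  apply List.map_congr_left
  intro k hk
  have := PySem.Dict.getD_foldl_modify_append P PySem.Dict.empty k
  simp only [pvBuildB, pvOcc]
  congr 1

-- core: A's scan from a seen-dict of 'pre' equals B's select on the full index
theorem pv_main (rest : List (Char × Int)) :
    ∀ (pre : List (Char × Int)) (d : PySem.Dict Char Int) (P : List (Char × Int)),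
    P = pre ++ rest →
    (pre.map (·.1)).Nodup →
    (∀ x, d.get? x = (pre.find? (fun p => p.1 == x)).map (·.2)) →
    ((P.map (·.2)).Pairwise (· < ·)) →
    ¬ (P.map (·.1)).Nodup →
    pvSelB none (pvBuildB P).items = some (pvScan d rest) := by
  induction rest with
  | nil =>
    intro pre d P hP hnd hd hinc hdup
    exact absurd (hP ▸ (by simpa using hnd)) hdup
  | cons p rest' ih =>
    intro pre d P hP hnd hd hinc hdup
    obtain ⟨c, i⟩ := p
    cases hget : d.get? c with
    | some j =>
      -- A returns here: c was seen in pre with first position j; show B's select picks it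
      have hfind : pre.find? (fun p => p.1 == c) = some (c, j) := by
        have h := hd c; rw [hget] at h
        cases hf : pre.find? (fun p => p.1 == c) with
        | none => rw [hf] at h; simp at h
        | some q =>
          obtain ⟨q1, q2⟩ := q
          rw [hf] at h
          have hq1 : q1 = c := by simpa using List.find?_some hf
          have hq2 : q2 = j := by simpa using h.symm
          rw [hq1, hq2]
      have hpref : pre.filter (fun p => p.1 == c) = [(c, j)] :=
        pv_filter_singleton_of_find? pre c hnd _ hfind
      have hoccc : pvOcc P c = j :: i :: pvOcc rest' c := by
        rw [hP, pvOcc_append]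
        simp [pvOcc, hpref]
      -- every i-successor index in P is > i
      have htail : ∀ b ∈ rest'.map (·.2), i < b := by
        have hsub : List.Sublist ((c, i) :: rest') P := by
          rw [hP]; exact List.sublist_append_right pre _
        have hsub2 : List.Sublist (i :: rest'.map (·.2)) (P.map (·.2)) := by
          simpa using hsub.map (·.2)
        exact (List.pairwise_cons.mp (hinc.sublist hsub2)).1
      rw [pvBuildB_items]
      simp only [pvScan, hget]
      apply pvSelB_min _ c j i (pvOcc rest' c)
      · apply List.mem_map.mpr
        refine ⟨c, ?_, by rw [hoccc]⟩
        apply (PySem.Set.mem_ofList _ _).mpr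
        rw [hP]; simp
      · rw [List.map_map]
        have hid : ((fun (x : Char × List Int) => x.1) ∘ fun k => (k, pvOcc P k)) = id := rfl
        rw [hid, List.map_id]
        exact PySem.Set.nodup_ofList _
      · intro q hq hqc a b l hl
        obtain ⟨k, hk, rfl⟩ := List.mem_map.mp hq
        simp only at hqc hl
        -- q.2 = pvOcc P k with k ≠ c; its second entry lies in rest'
        have hkocc : pvOcc P k = pvOcc pre k ++ pvOcc rest' k := by
          rw [hP, pvOcc_append]
          have : ((c, i) :: rest').filter (fun p => p.1 == k) = rest'.filter (fun p => p.1 == k) := by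
            simp [Ne.symm hqc]
          simp [pvOcc, this]
        have hlen : (pvOcc pre k).length ≤ 1 := by
          simp only [pvOcc, List.length_map]
          by_cases hmem : k ∈ pre.map (·.1)
          · cases hf : pre.find? (fun p => p.1 == k) with
            | none => exact absurd hmem (pv_not_mem_of_find?_none pre k hf)
            | some q => rw [pv_filter_singleton_of_find? pre k hnd q hf]; simp
          · rw [List.filter_eq_nil_iff.mpr]
            · simp
            · intro x hx hxk
              apply hmem
              have hx1 : x.1 = k := by simpa using hxk
              rw [← hx1]
              exact List.mem_map.mpr ⟨x, hx, rfl⟩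
        have hb_mem : b ∈ pvOcc rest' k := by
          rw [hkocc] at hl
          rcases hocc : pvOcc pre k with _ | ⟨x, xs⟩
          · rw [hocc] at hl; simp only [List.nil_append] at hl
            rw [hl]; simp
          · have : xs = [] := by
              have := hlen; rw [hocc] at this; simp at this; simpa using this
            subst this
            rw [hocc] at hl
            simp only [List.cons_append, List.nil_append, List.cons.injEq] at hl
            rw [hl.2]; simp
        have : b ∈ rest'.map (·.2) := by
          simp only [pvOcc] at hb_mem
          obtain ⟨q, hq', rfl⟩ := List.mem_map.mp hb_mem
          exact List.mem_map_of_mem (List.mem_of_mem_filter hq')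
        exact htail b this
      · exact Or.inl rfl
    | none =>
      have hcnot : c ∉ pre.map (·.1) := by
        apply pv_not_mem_of_find?_none
        have h := hd c; rw [hget] at h
        cases hf : pre.find? (fun p => p.1 == c) with
        | none => rfl
        | some q => rw [hf] at h; simp at h
      have hnd' : ((pre ++ [(c, i)]).map (·.1)).Nodup := by
        simp only [List.map_append]
        exact List.Nodup.append hnd (by simp) (by simpa [List.disjoint_singleton] using hcnot)
      have hd' : ∀ x, (d.insert c i).get? x
          = ((pre ++ [(c, i)]).find? (fun p => p.1 == x)).map (·.2) := by
        intro x
        rw [PySem.Dict.get?_insert, List.find?_append]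
        by_cases hxc : x = c
        · subst hxc
          have : pre.find? (fun p => p.1 == x) = none := by
            have h := hd x; rw [hget] at h
            cases hf : pre.find? (fun p => p.1 == x) with
            | none => rfl
            | some q => rw [hf] at h; simp at h
          simp [this]
        · have : ((c, i) :: []).find? (fun p => p.1 == x) = none := by
            simp [Ne.symm hxc]
          simp [hxc, this, hd x]
      have := ih (pre ++ [(c, i)]) (d.insert c i) P (by rw [hP]; simp) hnd' hd' hinc hdup
      simpa [pvScan, hget] using this
    
-- fst-projection of B's pair list is the lowered filtered character list
theorem pvPairs_fst (l : List Char) (s : Int) :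
    (((PySem.List.enumerate l s).filter (fun p => PySem.Chars.isalpha p.2)).map
      (fun p => (PySem.Chars.lowerChar p.2, p.1))).map (·.1)
    = (l.filter PySem.Chars.isalpha).map PySem.Chars.lowerChar := by
  induction l generalizing s with
  | nil => rfl
  | cons x xs ih =>
    rw [PySem.List.enumerate_cons]
    by_cases h : PySem.Chars.isalpha x
    · simp [h, ih]
    · simp [h, ih]

theorem pvPairs_snd_pairwise (l : List Char) (s : Int) :
    ((((PySem.List.enumerate l s).filter (fun p => PySem.Chars.isalpha p.2)).map
      (fun p => (PySem.Chars.lowerChar p.2, p.1))).map (·.2)).Pairwise (· < ·) := by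
  rw [List.map_map, List.pairwise_map]
  exact ((PySem.List.pairwise_lt_enumerate l s).sublist List.filter_sublist).imp (by simp)

-- ===== VERDICT =====
theorem find_recurring_char_spec : Claim_equal_find_recurring_char := by
  intro text _ hpre
  unfold Spec_find_recurring_char find_recurring_char find_recurring_char_alt
  rw [pvGoA_eq_scan]
  have hmain := pv_main (pvPairsB text) [] PySem.Dict.empty (pvPairsB text)
    (by simp) (by simp) (by simp [PySem.Dict.get?_empty])
    (pvPairs_snd_pairwise text.toList 0)
    (by rw [show (pvPairsB text).map (·.1) = _ from pvPairs_fst text.toList 0]; exact hpre)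
  rw [show ((PySem.List.enumerate text.toList).filter (fun p => PySem.Chars.isalpha p.2)).map
      (fun p => (PySem.Chars.lowerChar p.2, p.1)) = pvPairsB text from rfl]
  rw [hmain]
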